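-- pv_equiv track=rewrite | github.com/louisabraham/har2requests | har2requests/stringalg.py | to_int_keys
-- ===== SOURCE A (Python) =====
-- def to_int_keys(l):
--     """
--     l: iterable of keys
--     returns: a list with integer keys
--     """
--     seen = set()
--     ls = []
--     for e in l:
--         if not e in seen:
--             ls.append(e)
--             seen.add(e)
--     ls.sort()
--     index = {v: i for i, v in enumerate(ls)}
--     return [index[v] for v in l]
-- ===== SOURCE B (Python) =====
-- def to_int_keys(l):
--     """
--     l: iterable of keys
--     returns: a list with integer keys
--     """
--     # rank of v = number of distinct values strictly smaller than v (no sorting)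
--     distinct = set(l)
--     return [sum(1 for u in distinct if u < v) for v in l]
-- ===== Notes on version B (the rewrite author's own statement) =====
-- stated objective: alternative
-- what changed: B never sorts or builds an index dict: it computes each element's rank directly as the count of distinct values strictly smaller than it, using one set and a counting comprehension.
import Mathlib
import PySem

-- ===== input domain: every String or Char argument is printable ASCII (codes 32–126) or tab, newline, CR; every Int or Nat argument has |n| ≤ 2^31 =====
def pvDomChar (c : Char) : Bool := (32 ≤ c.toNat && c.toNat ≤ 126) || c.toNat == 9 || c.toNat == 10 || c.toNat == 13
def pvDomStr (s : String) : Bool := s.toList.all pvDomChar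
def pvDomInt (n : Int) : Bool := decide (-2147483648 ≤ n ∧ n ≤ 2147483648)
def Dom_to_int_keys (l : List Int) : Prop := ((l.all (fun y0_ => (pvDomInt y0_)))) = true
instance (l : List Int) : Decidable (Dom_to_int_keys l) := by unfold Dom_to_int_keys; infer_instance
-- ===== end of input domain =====

-- B changes the algorithm: rank = count of smaller distinct values, no sort, no index dict (objective: alternative).

-- ===== PORT A =====
-- seen = set(); ls = []; for e in l: if not e in seen: ls.append(e); seen.add(e)
-- ls.sort(); index = {v: i for i, v in enumerate(ls)}; return [index[v] for v in l]
def to_int_keys (l : List Int) : List Int :=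
  let st := l.foldl (fun (p : PySem.Set Int × List Int) e =>
    if p.1.contains e then p else (p.1.add e, p.2 ++ [e])) (PySem.Set.empty, [])
  let ls := PySem.List.sorted st.2 (fun x => x) false
  let index := (PySem.List.enumerate ls).foldl
    (fun (d : PySem.Dict Int Int) p => d.insert p.2 p.1) PySem.Dict.empty
  -- index[v]: KeyError is unreachable, every v of l is in ls; getD's default is never used
  l.map (fun v => index.getD v 0)

-- ===== PORT B =====
-- distinct = set(l); return [sum(1 for u in distinct if u < v) for v in l]
def to_int_keys_alt (l : List Int) : List Int :=
  let distinct : PySem.Set Int := PySem.Set.ofList l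
  l.map (fun v => distinct.foldl (fun acc u => if u < v then acc + 1 else acc) (0 : Int))

-- ===== PRECONDITION & SPEC =====
def Spec_to_int_keys (l : List Int) (out : List Int) : Prop := out = to_int_keys_alt l
instance (l : List Int) (out : List Int) : Decidable (Spec_to_int_keys l out) := by unfold Spec_to_int_keys; infer_instance

-- ===== CLAIM (what is proved, stated in full; the proofs are below) =====
def Claim_equal_to_int_keys : Prop := ∀ (l : List Int), Dom_to_int_keys l → Spec_to_int_keys l (to_int_keys l)

-- ===== LEMMAS AND PROOFS =====

-- A's dedup loop keeps its two components equal: both are foldl Set.add.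
theorem pv_pair_fold (l : List Int) (s : List Int) :
    l.foldl (fun (p : PySem.Set Int × List Int) e =>
      if p.1.contains e then p else (p.1.add e, p.2 ++ [e])) (s, s)
    = (l.foldl PySem.Set.add s, l.foldl PySem.Set.add s) := by
  induction l generalizing s with
  | nil => rfl
  | cons x t ih =>
    by_cases hc : PySem.Set.contains s x = true
    · have ha : PySem.Set.add s x = s := by simp only [PySem.Set.add, if_pos hc]
      rw [List.foldl_cons, List.foldl_cons, if_pos hc, ha]
      exact ih s
    · have ha : PySem.Set.add s x = s ++ [x] := by simp only [PySem.Set.add, if_neg hc]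
      rw [List.foldl_cons, List.foldl_cons, if_neg hc, ha]
      exact ih (s ++ [x])

-- values not in the enumerated list are untouched by the dict-building fold
theorem pv_get?_fold_not_mem (t : List Int) (k : Int) (d : PySem.Dict Int Int)
    (v : Int) (hv : v ∉ t) :
    ((PySem.List.enumerate t k).foldl
      (fun (d : PySem.Dict Int Int) p => d.insert p.2 p.1) d).get? v = d.get? v := by
  induction t generalizing k d with
  | nil => rfl
  | cons x t ih =>
    simp only [PySem.List.enumerate_cons, List.foldl_cons]
    rw [ih _ _ (fun h => hv (List.mem_cons_of_mem _ h))]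
    rw [PySem.Dict.get?_insert_of_ne]
    exact fun h => hv (by simp [h])

-- on a strictly increasing list, the index dict maps v to k + #{u ∈ s | u < v}
theorem pv_getD_fold (s : List Int) (hs : s.Pairwise (· < ·)) (v : Int) (hv : v ∈ s)
    (k : Int) (d : PySem.Dict Int Int) :
    ((PySem.List.enumerate s k).foldl
      (fun (d : PySem.Dict Int Int) p => d.insert p.2 p.1) d).getD v 0
    = k + ((s.filter (fun u => decide (u < v))).length : Int) := by
  induction s generalizing k d with
  | nil => cases hv
  | cons x t ih =>
    simp only [PySem.List.enumerate_cons, List.foldl_cons]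
    rcases List.mem_cons.mp hv with h | h
    · subst h
      have hnot : v ∉ t := fun hmem => lt_irrefl v ((List.pairwise_cons.mp hs).1 v hmem)
      rw [PySem.Dict.getD, pv_get?_fold_not_mem _ _ _ _ hnot, PySem.Dict.get?_insert_self]
      have hfx : decide (v < v) = false := by simp
      have hft : t.filter (fun u => decide (u < v)) = [] := by
        rw [List.filter_eq_nil_iff]
        intro u hu
        simp only [decide_eq_true_eq]
        exact not_lt_of_gt ((List.pairwise_cons.mp hs).1 u hu)
      simp [hft]
    · have hxv : x < v := (List.pairwise_cons.mp hs).1 v h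
      rw [ih (List.pairwise_cons.mp hs).2 h (k + 1)]
      have : decide (x < v) = true := by simpa using hxv
      simp [this]
      ring

-- B's counting fold is the filter length
theorem pv_count_fold (xs : List Int) (v : Int) (acc : Int) :
    xs.foldl (fun acc u => if u < v then acc + 1 else acc) acc
    = acc + ((xs.filter (fun u => decide (u < v))).length : Int) := by
  induction xs generalizing acc with
  | nil => simp
  | cons x t ih =>
    by_cases h : x < v
    · simp [List.foldl_cons, h, ih]; ring
    · simp [List.foldl_cons, h, ih]

-- ===== VERDICT (by name: the statement is the Claim_ definition above) =====
theorem to_int_keys_spec : Claim_equal_to_int_keys := by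
  intro l _
  show to_int_keys l = to_int_keys_alt l
  unfold to_int_keys to_int_keys_alt
  have hpair := pv_pair_fold l []
  simp only [PySem.Set.empty, hpair]
  apply List.map_congr_left
  intro v hv
  have hofl : l.foldl PySem.Set.add [] = PySem.Set.ofList l := (PySem.Set.ofList_eq_foldl l).symm
  rw [hofl]
  set s := PySem.List.sorted (PySem.Set.ofList l) (fun x => x) false with hsdef
  have hvs : v ∈ s := by
    rw [hsdef, PySem.List.mem_sorted, PySem.Set.mem_ofList]; exact hv
  have hsp : s.Pairwise (· < ·) := PySem.List.sorted_ofList_pairwise_lt l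
  rw [pv_getD_fold s hsp v hvs 0 PySem.Dict.empty, pv_count_fold]
  have hperm : s.Perm (PySem.Set.ofList l) := PySem.List.sorted_perm _ _ _
  rw [(hperm.filter _).length_eq]
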